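-- pv_equiv track=rewrite | github.com/jing1988a/python_fb | BestTimetoBuyandSellStockIII151.py | getLmax
-- ===== SOURCE A (Python) =====
-- def getLmax(prices , l):
--     buy=prices[0]
--     ans=[0 for i in range(l)]
--     cur=0
--     for i in range(1 , l):
--         if prices[i]-buy>cur:
--             cur=prices[i]-buy
--         if prices[i]<buy:
--             buy=prices[i]
--         ans[i]=cur
--     return ans
-- ===== SOURCE B (Python) =====
-- def getLmax(prices, l):
--     # prefix-minimum table, then a running-max pass over per-day profits
--     pmin = [prices[0]]
--     for i in range(1, l):
--         pmin.append(min(pmin[-1], prices[i]))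
--     ans = [0] * l
--     cur = 0
--     for i in range(1, l):
--         profit = prices[i] - pmin[i - 1]
--         if profit > cur:
--             cur = profit
--         ans[i] = cur
--     return ans
-- ===== Notes on version B (the rewrite author's own statement) =====
-- stated objective: alternative
-- what changed: Replaces A's single fused pass (scalar running-min buy and running-max cur updated together) with a two-pass decomposition: first a prefix-minimum table pmin, then a separate running-max pass over profits prices[i]-pmin[i-1].
import Mathlib
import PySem

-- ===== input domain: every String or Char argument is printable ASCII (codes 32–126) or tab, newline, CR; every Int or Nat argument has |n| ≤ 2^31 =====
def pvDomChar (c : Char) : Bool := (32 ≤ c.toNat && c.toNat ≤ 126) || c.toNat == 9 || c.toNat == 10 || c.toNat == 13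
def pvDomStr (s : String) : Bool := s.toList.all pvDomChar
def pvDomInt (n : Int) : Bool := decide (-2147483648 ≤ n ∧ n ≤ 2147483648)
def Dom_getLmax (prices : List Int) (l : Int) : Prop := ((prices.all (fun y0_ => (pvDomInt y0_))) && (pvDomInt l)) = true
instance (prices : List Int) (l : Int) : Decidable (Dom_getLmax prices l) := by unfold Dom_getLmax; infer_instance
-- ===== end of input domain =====

-- B replaces A's single fused pass (running-min buy and running-max cur updated together)
-- with a two-pass decomposition: a prefix-minimum table, then a running-max pass over profits.


-- ===== PORT A =====
-- one pass i = 1..l-1, fused state (buy, cur, ans)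
def stepA (prices : List Int) (st : Int × Int × List Int) (i : Int) : Int × Int × List Int :=
  let p := PySem.List.pyGetD prices i 0
  let cur := if p - st.1 > st.2.1 then p - st.1 else st.2.1
  let buy := if p < st.1 then p else st.1
  (buy, cur, PySem.List.pySetD st.2.2 i cur)

def getLmax (prices : List Int) (l : Int) : List Int :=
  ((PySem.List.pyRange 1 l 1).foldl (stepA prices)
    (PySem.List.pyGetD prices 0 0, 0, List.replicate l.toNat 0)).2.2

-- ===== PORT B =====
-- pass 1: prefix-minimum table pmin (pmin[-1] is the last entry so far)
def stepPmin (prices : List Int) (pm : List Int) (i : Int) : List Int :=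
  pm ++ [min (PySem.List.pyGetD pm (-1) 0) (PySem.List.pyGetD prices i 0)]

-- pass 2: running maximum of profits prices[i] - pmin[i-1]
def stepB (prices pmin : List Int) (st : Int × List Int) (i : Int) : Int × List Int :=
  let profit := PySem.List.pyGetD prices i 0 - PySem.List.pyGetD pmin (i - 1) 0
  let cur := if profit > st.1 then profit else st.1
  (cur, PySem.List.pySetD st.2 i cur)

def getLmax_alt (prices : List Int) (l : Int) : List Int :=
  let pmin := (PySem.List.pyRange 1 l 1).foldl (stepPmin prices) [PySem.List.pyGetD prices 0 0]
  ((PySem.List.pyRange 1 l 1).foldl (stepB prices pmin) (0, List.replicate l.toNat 0)).2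

-- ===== PRECONDITION & SPEC =====
-- Pre_ excludes exactly the inputs where the Python raises IndexError: empty prices
-- (prices[0]) or l exceeding len(prices) (prices[i] inside the loop); B raises there too.
def Pre_getLmax (prices : List Int) (l : Int) : Prop :=
  prices ≠ [] ∧ l ≤ (prices.length : Int)
instance (prices : List Int) (l : Int) : Decidable (Pre_getLmax prices l) := by
  unfold Pre_getLmax; infer_instance

def pvWitness_getLmax : List Int × Int := ([3, 1, 4, 2, 7], 5)

def Spec_getLmax (prices : List Int) (l : Int) (out : List Int) : Prop := out = getLmax_alt prices l
instance (prices : List Int) (l : Int) (out : List Int) : Decidable (Spec_getLmax prices l out) := by unfold Spec_getLmax; infer_instance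

-- ===== CLAIM (what is proved, stated in full; the proofs are below) =====
def Claim_equal_getLmax : Prop := ∀ (prices : List Int) (l : Int), Dom_getLmax prices l → Pre_getLmax prices l → Spec_getLmax prices l (getLmax prices l)

-- ===== LEMMAS AND PROOFS =====

-- prefix minimum of prices[0..k]
def pmins (prices : List Int) : Nat → Int
  | 0 => PySem.List.pyGetD prices 0 0
  | k + 1 => min (pmins prices k) (PySem.List.pyGetD prices ((k + 1 : Nat) : Int) 0)

-- running maximum of profits after processing i = 1..k
def curs (prices : List Int) : Nat → Int
  | 0 => 0
  | k + 1 =>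
    let profit := PySem.List.pyGetD prices ((k + 1 : Nat) : Int) 0 - pmins prices k
    if profit > curs prices k then profit else curs prices k

-- ans after writing positions 1..k
def ansAcc (prices a0 : List Int) : Nat → List Int
  | 0 => a0
  | k + 1 => (ansAcc prices a0 k).set (k + 1) (curs prices (k + 1))

lemma pminFold (prices : List Int) (n : Nat) :
    (PySem.List.pyRange 1 ((n : Int) + 1) 1).foldl (stepPmin prices)
      [PySem.List.pyGetD prices 0 0]
    = (List.range (n + 1)).map (pmins prices) := by
  induction n with
  | zero => simp [PySem.List.pyRange_one_eq_nil, pmins]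
  | succ m ih =>
    rw [PySem.List.pyRange_one_succ_right (by omega), List.foldl_append]
    push_cast
    rw [ih]
    simp only [List.foldl_cons, List.foldl_nil, stepPmin]
    have hne : (List.range (m + 1)).map (pmins prices) ≠ [] := by simp
    rw [PySem.List.pyGetD_neg_one _ 0 hne, List.getLast_eq_getElem]
    simp only [List.length_map, List.length_range, Nat.add_sub_cancel, List.getElem_map,
      List.getElem_range]
    have h1 : ((m : Int) + 1) = ((m + 1 : Nat) : Int) := by push_cast; ring
    rw [h1]
    conv_rhs => rw [List.range_succ, List.map_append]
    simp only [List.map_cons, List.map_nil, pmins]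

lemma foldA (prices a0 : List Int) (n : Nat) :
    (PySem.List.pyRange 1 ((n : Int) + 1) 1).foldl (stepA prices)
      (PySem.List.pyGetD prices 0 0, 0, a0)
    = (pmins prices n, curs prices n, ansAcc prices a0 n) := by
  induction n with
  | zero => simp [PySem.List.pyRange_one_eq_nil, pmins, curs, ansAcc]
  | succ m ih =>
    rw [PySem.List.pyRange_one_succ_right (by omega), List.foldl_append]
    push_cast
    rw [ih]
    simp only [List.foldl_cons, List.foldl_nil, stepA]
    have h1 : ((m : Int) + 1) = ((m + 1 : Nat) : Int) := by push_cast; ring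
    rw [h1]
    refine Prod.ext ?_ (Prod.ext ?_ ?_)
    · -- buy component: if p < buy then p else buy = min buy p
      show (if PySem.List.pyGetD prices ((m + 1 : Nat) : Int) 0 < pmins prices m
            then PySem.List.pyGetD prices ((m + 1 : Nat) : Int) 0 else pmins prices m)
           = pmins prices (m + 1)
      simp only [pmins]
      split_ifs with h <;> omega
    · show (if PySem.List.pyGetD prices ((m + 1 : Nat) : Int) 0 - pmins prices m > curs prices m
            then PySem.List.pyGetD prices ((m + 1 : Nat) : Int) 0 - pmins prices m
            else curs prices m) = curs prices (m + 1)
      simp [curs]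
    · show PySem.List.pySetD (ansAcc prices a0 m) ((m + 1 : Nat) : Int)
            (if PySem.List.pyGetD prices ((m + 1 : Nat) : Int) 0 - pmins prices m > curs prices m
             then PySem.List.pyGetD prices ((m + 1 : Nat) : Int) 0 - pmins prices m
             else curs prices m)
           = ansAcc prices a0 (m + 1)
      rw [PySem.List.pySetD_natCast]
      simp [ansAcc, curs]

lemma foldB (prices a0 : List Int) (M k : Nat) (hk : k < M) :
    (PySem.List.pyRange 1 ((k : Int) + 1) 1).foldl
      (stepB prices ((List.range M).map (pmins prices))) (0, a0)
    = (curs prices k, ansAcc prices a0 k) := by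
  induction k with
  | zero => simp [PySem.List.pyRange_one_eq_nil, curs, ansAcc]
  | succ m ih =>
    rw [PySem.List.pyRange_one_succ_right (by omega), List.foldl_append]
    push_cast
    rw [ih (by omega)]
    simp only [List.foldl_cons, List.foldl_nil, stepB]
    have h1 : ((m : Int) + 1) = ((m + 1 : Nat) : Int) := by push_cast; ring
    have h2 : ((m : Int) + 1 - 1) = ((m : Nat) : Int) := by omega
    rw [h2, h1]
    have hget : PySem.List.pyGetD ((List.range M).map (pmins prices)) ((m : Nat) : Int) 0
        = pmins prices m := by
      rw [PySem.List.pyGetD_natCast, PySem.List.getD_map_range _ _ _ _ (by omega)]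
    rw [hget]
    refine Prod.ext ?_ ?_
    · show (if PySem.List.pyGetD prices ((m + 1 : Nat) : Int) 0 - pmins prices m > curs prices m
            then PySem.List.pyGetD prices ((m + 1 : Nat) : Int) 0 - pmins prices m
            else curs prices m) = curs prices (m + 1)
      simp [curs]
    · show PySem.List.pySetD (ansAcc prices a0 m) ((m + 1 : Nat) : Int)
            (if PySem.List.pyGetD prices ((m + 1 : Nat) : Int) 0 - pmins prices m > curs prices m
             then PySem.List.pyGetD prices ((m + 1 : Nat) : Int) 0 - pmins prices m
             else curs prices m) = ansAcc prices a0 (m + 1)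
      rw [PySem.List.pySetD_natCast]
      simp [ansAcc, curs]

-- ===== VERDICT (by name: the statement is the Claim_ definition above) =====
theorem getLmax_spec : Claim_equal_getLmax := by
  intro prices l _ _
  unfold Spec_getLmax
  by_cases hl : l ≤ 0
  · simp only [getLmax, getLmax_alt]
    rw [PySem.List.pyRange_one_eq_nil (by omega)]
    simp
  · obtain ⟨m, hm⟩ : ∃ m : Nat, l = (m : Int) + 1 := ⟨(l - 1).toNat, by omega⟩
    subst hm
    simp only [getLmax, getLmax_alt]
    rw [pminFold, foldA, foldB prices _ (m + 1) m (by omega)]
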